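-- pv_equiv track=rewrite | github.com/proggeguden/nmiai | tripletex/agent.py | _fix_fields_dots
-- ===== SOURCE A (Python) =====
-- def _fix_fields_dots(fields: str) -> str:
--     """Convert dot-notation fields to parentheses: orders.orderLines.desc → orders(orderLines(desc))"""
--     parts = fields.split(",")
--     fixed_parts = []
--     for part in parts:
--         part = part.strip()
--         if "." in part:
--             segments = part.split(".")
--             # Build from inside out: a.b.c → a(b(c))
--             result = segments[-1]
--             for seg in reversed(segments[:-1]):
--                 result = f"{seg}({result})"
--             fixed_parts.append(result)
--         else:
--             fixed_parts.append(part)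
--     return ",".join(fixed_parts)
-- ===== SOURCE B (Python) =====
-- def _fix_fields_dots(fields: str) -> str:
--     out = []
--     for part in fields.split(","):
--         segs = part.strip().split(".")
--         out.append("(".join(segs) + ")" * (len(segs) - 1))
--     return ",".join(out)
-- ===== Notes on version B (the rewrite author's own statement) =====
-- stated objective: simpler
-- what changed: Replaces A's inside-out reversed accumulation loop and its dot/no-dot branch by a closed form per comma part: join the dot segments with an opening parenthesis and append len(segments)-1 closing parentheses.
import Mathlib
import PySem

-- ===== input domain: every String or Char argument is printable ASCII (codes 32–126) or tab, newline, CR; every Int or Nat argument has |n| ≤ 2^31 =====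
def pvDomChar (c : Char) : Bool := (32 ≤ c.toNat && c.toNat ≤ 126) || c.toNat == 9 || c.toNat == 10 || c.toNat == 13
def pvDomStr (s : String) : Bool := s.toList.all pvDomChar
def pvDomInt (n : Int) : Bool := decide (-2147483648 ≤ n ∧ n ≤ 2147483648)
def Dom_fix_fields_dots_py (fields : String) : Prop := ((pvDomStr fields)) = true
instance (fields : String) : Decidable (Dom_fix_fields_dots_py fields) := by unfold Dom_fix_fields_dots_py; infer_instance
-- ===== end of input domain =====

-- B replaces A's inside-out accumulation loop (and its dot/no-dot branch) by a closed form per comma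
-- part: join the dot segments with an opening paren, append len-1 closing parens; simpler, same cost.

-- ===== PORT A =====
-- one comma-separated part of A's loop body (strings handled as List Char throughout via PySem.Chars)
def pvFixPartA (cs : List Char) : List Char :=
  let part := PySem.Chars.strip cs
  if PySem.Chars.isIn ['.'] part then
    let segments := PySem.Chars.splitOn part ['.']
    -- segments[-1]: split always yields a nonempty list, so the IndexError default [] is unreachable
    let result := (PySem.List.pyGet? segments (-1)).getD []
    ((PySem.List.slice segments none (some (-1))).reverse).foldl
      (fun r seg => seg ++ '(' :: (r ++ [')'])) result
  else part

def fix_fields_dots_py (fields : String) : String :=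
  String.ofList (PySem.Chars.join [','] ((PySem.Chars.splitOn fields.toList [',']).map pvFixPartA))

-- ===== PORT B =====
def pvFixPartB (cs : List Char) : List Char :=
  let segs := PySem.Chars.splitOn (PySem.Chars.strip cs) ['.']
  PySem.Chars.join ['('] segs ++ List.replicate (segs.length - 1) ')'

def fix_fields_dots_py_alt (fields : String) : String :=
  String.ofList (PySem.Chars.join [','] ((PySem.Chars.splitOn fields.toList [',']).map pvFixPartB))

-- ===== PRECONDITION & SPEC =====
def Spec_fix_fields_dots_py (fields : String) (out : String) : Prop := out = fix_fields_dots_py_alt fields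
instance (fields : String) (out : String) : Decidable (Spec_fix_fields_dots_py fields out) := by unfold Spec_fix_fields_dots_py; infer_instance

-- ===== CLAIM (what is proved, stated in full; the proofs are below) =====
def Claim_equal_fix_fields_dots_py : Prop := ∀ (fields : String), Dom_fix_fields_dots_py fields → Spec_fix_fields_dots_py fields (fix_fields_dots_py fields)

-- ===== LEMMAS AND PROOFS =====

-- splitOn.go never returns the empty list
lemma pv_go_ne_nil (sep : List Char) : ∀ (fuel : Nat) (l cur : List Char) (acc : List (List Char)),
    PySem.Chars.splitOn.go sep fuel l cur acc ≠ [] := by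
  intro fuel
  induction fuel with
  | zero => intro l cur acc; unfold PySem.Chars.splitOn.go; simp
  | succ n ih =>
    intro l cur acc
    cases l with
    | nil => unfold PySem.Chars.splitOn.go; simp
    | cons c rest =>
      unfold PySem.Chars.splitOn.go
      split
      · exact ih _ _ _
      · exact ih _ _ _

lemma pv_splitOn_ne_nil (cs sep : List Char) : PySem.Chars.splitOn cs sep ≠ [] := by
  unfold PySem.Chars.splitOn; exact pv_go_ne_nil sep _ _ _ _

-- if sep never occurs in l, go just re-assembles cur.reverse ++ l
lemma pv_go_no_sep (sep : List Char) : ∀ (fuel : Nat) (l cur : List Char) (acc : List (List Char)),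
    l.length < fuel → ¬ sep <:+: l →
    PySem.Chars.splitOn.go sep fuel l cur acc = ((cur.reverse ++ l) :: acc).reverse := by
  intro fuel
  induction fuel with
  | zero => intro l cur acc h _; exact absurd h (Nat.not_lt_zero _)
  | succ n ih =>
    intro l cur acc hlen hinf
    cases l with
    | nil => unfold PySem.Chars.splitOn.go; simp
    | cons c rest =>
      unfold PySem.Chars.splitOn.go
      have hpre : sep.isPrefixOf (c :: rest) = false := by
        by_contra h
        exact hinf ((List.isPrefixOf_iff_prefix.mp (by simpa using h)).isInfix)
      simp only [hpre, Bool.false_eq_true, if_false]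
      rw [ih rest (c :: cur) acc (by simpa using Nat.lt_of_succ_lt_succ hlen)
        (fun h => hinf (h.trans (List.suffix_cons c rest).isInfix))]
      simp

lemma pv_splitOn_of_not_infix (cs sep : List Char) (h : ¬ sep <:+: cs) :
    PySem.Chars.splitOn cs sep = [cs] := by
  unfold PySem.Chars.splitOn
  rw [pv_go_no_sep sep (cs.length + 1) cs [] [] (by omega) h]
  simp

-- join with a nonempty tail peels one element
lemma pv_join_cons (sep x : List Char) (l : List (List Char)) (h : l ≠ []) :
    PySem.Chars.join sep (x :: l) = x ++ sep ++ PySem.Chars.join sep l := by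
  cases l with
  | nil => exact absurd rfl h
  | cons y t => rw [PySem.Chars.join_cons_cons]

-- A's inside-out accumulation equals B's closed form join + closing parens
lemma pv_loop_eq (pre : List (List Char)) (last : List Char) :
    pre.reverse.foldl (fun r seg => seg ++ '(' :: (r ++ [')'])) last
      = PySem.Chars.join ['('] (pre ++ [last]) ++ List.replicate pre.length ')' := by
  induction pre with
  | nil => simp [PySem.Chars.join_singleton]
  | cons s pre' ih =>
    rw [List.reverse_cons, List.foldl_append, ih]
    rw [List.cons_append, pv_join_cons ['('] s (pre' ++ [last]) (by simp)]
    simp [List.replicate_succ']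

lemma pv_part_eq (cs : List Char) : pvFixPartA cs = pvFixPartB cs := by
  unfold pvFixPartA pvFixPartB
  by_cases h : PySem.Chars.isIn ['.'] (PySem.Chars.strip cs) = true
  · rw [if_pos h]
    obtain ⟨pre, last, hseg⟩ :
        ∃ pre last, PySem.Chars.splitOn (PySem.Chars.strip cs) ['.'] = pre ++ [last] := by
      rcases List.eq_nil_or_concat (PySem.Chars.splitOn (PySem.Chars.strip cs) ['.']) with h0 | ⟨p, a, h0⟩
      · exact absurd h0 (pv_splitOn_ne_nil _ _)
      · exact ⟨p, a, by simpa using h0⟩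
    rw [hseg]
    simp only [PySem.List.pyGet?_neg_one, PySem.List.slice_to_neg_one,
      List.getLast?_concat, Option.getD_some, List.dropLast_concat]
    rw [pv_loop_eq]
    simp
  · rw [if_neg h]
    have h' : ¬ (['.'] : List Char) <:+: PySem.Chars.strip cs :=
      (PySem.Chars.isIn_eq_false_iff _ _).mp (by simpa using h)
    rw [pv_splitOn_of_not_infix _ _ h']
    simp [PySem.Chars.join_singleton]

-- ===== VERDICT (by name: the statement is the Claim_ definition above) =====
theorem fix_fields_dots_py_spec : Claim_equal_fix_fields_dots_py := by
  intro fields _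
  unfold Spec_fix_fields_dots_py fix_fields_dots_py fix_fields_dots_py_alt
  rw [List.map_congr_left (fun cs _ => pv_part_eq cs)]
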